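-- pv_equiv track=rewrite | github.com/Holour/U-Shall-Eat | src/client.py | format_reply_message
-- ===== SOURCE A (Python) =====
-- def format_reply_message(message: str) -> str:
--     """
--     格式化回复消息，使其每行最多64个字符，最多四行，
--     超过部分在第四行显示前62个字符并添加省略号。
--
--     :param message: 原始回复消息
--     :return: 格式化后的回复消息
--     """
--     max_lines = 4
--     max_chars_per_line = 64
--     result_lines = []
--     current_pos = 0
--     for i in range(max_lines):
--         if current_pos >= len(message):
--             break
--         remaining_chars = len(message) - current_pos
--         if i < max_lines - 1:
--             # 前三行，每行最多64个字符
--             line = message[current_pos:current_pos + max_chars_per_line]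
--             result_lines.append(line)
--             current_pos += max_chars_per_line
--         else:
--             # 第四行
--             if remaining_chars > max_chars_per_line:
--                 # 截断到62个字符并添加省略号
--                 line = message[current_pos:current_pos + 62] + "..."
--             else:
--                 line = message[current_pos:]
--             result_lines.append(line)
--     return "\n".join(result_lines)
-- ===== SOURCE B (Python) =====
-- def format_reply_message(message: str) -> str:
--     """Format message into up to four 64-char lines by recursively peeling
--     one line off the front (last allowed line: 62 chars plus an ellipsis if more remains)."""
--     def go(rest, lines_left):
--         if not rest:
--             return []
--         if lines_left == 1:
--             return [rest[:62] + "..."] if len(rest) > 64 else [rest]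
--         return [rest[:64]] + go(rest[64:], lines_left - 1)
--     return "\n".join(go(message, 4))
-- ===== Notes on version B (the rewrite author's own statement) =====
-- stated objective: simpler
-- what changed: Replaces A's indexed loop with a position counter, an in-loop break and an i<max_lines-1 branch by a recursive decomposition that peels one line off the front of the remaining string, with the 62-char-plus-ellipsis truncation as the base case of the recursion.
import Mathlib
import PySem

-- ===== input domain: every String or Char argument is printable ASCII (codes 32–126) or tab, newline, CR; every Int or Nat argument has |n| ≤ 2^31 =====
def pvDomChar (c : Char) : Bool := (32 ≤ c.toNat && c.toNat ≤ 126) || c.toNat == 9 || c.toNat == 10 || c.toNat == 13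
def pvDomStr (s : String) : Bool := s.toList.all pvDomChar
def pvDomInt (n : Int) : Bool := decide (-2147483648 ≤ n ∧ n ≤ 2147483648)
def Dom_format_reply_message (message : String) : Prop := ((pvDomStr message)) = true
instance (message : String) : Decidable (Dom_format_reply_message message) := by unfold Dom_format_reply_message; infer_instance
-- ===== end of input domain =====

-- B replaces A's indexed loop (position counter, in-loop break, i < max_lines-1 branch)
-- by a recursion that peels one line off the front of the remaining string (objective: simpler).

-- ===== PORT A =====
-- one iteration of A's for-loop body; state (some pos, lines), or (none, lines) once 'break' fired
def pvAStep (msg : List Char) (st : Option Int × List (List Char)) (i : Int) :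
    Option Int × List (List Char) :=
  match st with
  | (none, acc) => (none, acc)
  | (some pos, acc) =>
    if pos ≥ (msg.length : Int) then (none, acc)
    else
      let remaining : Int := (msg.length : Int) - pos
      if i < 4 - 1 then
        (some (pos + 64), acc ++ [PySem.List.slice msg (some pos) (some (pos + 64))])
      else
        if remaining > 64 then
          (some pos, acc ++ [PySem.List.slice msg (some pos) (some (pos + 62)) ++ "...".toList])
        else
          (some pos, acc ++ [PySem.List.slice msg (some pos) none])

def format_reply_message (message : String) : String :=
  let msg := message.toList
  let st := (PySem.List.pyRange 0 4 1).foldl (pvAStep msg) (some 0, [])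
  String.ofList (PySem.Chars.join ['\n'] st.2)

-- ===== PORT B =====
-- the inner recursive 'go'; the slices rest[:62], rest[:64], rest[64:] have nonnegative
-- literal bounds, where Python slicing is exactly List.take / List.drop
def pvBGo (rest : List Char) (linesLeft : Int) : List (List Char) :=
  if h : rest = [] then []
  else if linesLeft = 1 then
    if (rest.length : Int) > 64 then [rest.take 62 ++ "...".toList] else [rest]
  else rest.take 64 :: pvBGo (rest.drop 64) (linesLeft - 1)
termination_by rest.length
decreasing_by
  have : 0 < rest.length := List.length_pos_iff.mpr h
  simp [List.length_drop]; omega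

def format_reply_message_alt (message : String) : String :=
  String.ofList (PySem.Chars.join ['\n'] (pvBGo message.toList 4))

-- ===== PRECONDITION & SPEC =====
def Spec_format_reply_message (message : String) (out : String) : Prop := out = format_reply_message_alt message
instance (message : String) (out : String) : Decidable (Spec_format_reply_message message out) := by unfold Spec_format_reply_message; infer_instance

-- ===== CLAIM (what is proved, stated in full; the proofs are below) =====
def Claim_equal_format_reply_message : Prop := ∀ (message : String), Dom_format_reply_message message → Spec_format_reply_message message (format_reply_message message)

-- ===== LEMMAS AND PROOFS =====
theorem pvBGo_nil (lL : Int) : pvBGo [] lL = [] := by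
  rw [pvBGo]; simp

theorem pvBGo_step (rest : List Char) (h : rest ≠ []) (lL : Int) (hL : lL ≠ 1) :
    pvBGo rest lL = rest.take 64 :: pvBGo (rest.drop 64) (lL - 1) := by
  rw [pvBGo, dif_neg h, if_neg hL]

theorem pvBGo_last (rest : List Char) (h : rest ≠ []) :
    pvBGo rest 1 =
      if (rest.length : Int) > 64 then [rest.take 62 ++ "...".toList] else [rest] := by
  rw [pvBGo, dif_neg h, if_pos rfl]

theorem lines_eq (msg : List Char) :
    ((PySem.List.pyRange 0 4 1).foldl (pvAStep msg) (some 0, [])).2 = pvBGo msg 4 := by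
  have h0 : PySem.List.slice msg none (some 64) = msg.take 64 := by
    rw [PySem.List.slice_to _ (by norm_num)]; rfl
  have h1 : PySem.List.slice msg (some 64) (some 128) = (msg.drop 64).take 64 := by
    rw [PySem.List.slice_toNat _ (by norm_num) (by norm_num)]; rfl
  have h2 : PySem.List.slice msg (some 128) (some 192) = (msg.drop 128).take 64 := by
    rw [PySem.List.slice_toNat _ (by norm_num) (by norm_num)]; rfl
  rw [show PySem.List.pyRange 0 4 1 = [0,1,2,3] from by decide]
  have hd64 : ∀ k : Nat, msg.length ≤ k → msg.drop k = [] := fun k hk =>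
    List.drop_eq_nil_iff.mpr hk
  have hne : ∀ k : Nat, k < msg.length → msg.drop k ≠ [] := by
    intro k hk h
    have := congrArg List.length h
    simp at this; omega
  set n := msg.length with hn
  by_cases hz : n = 0
  · have : msg = [] := List.length_eq_zero_iff.mp hz
    subst this
    rw [pvBGo_nil]; decide
  · have hmne : msg ≠ [] := fun h => hz (by simp [hn, h])
    by_cases hc : n ≤ 64
    · -- one line
      simp only [List.foldl, pvAStep]
      rw [if_neg (by omega), if_pos (by norm_num)]
      simp only [List.foldl]
      rw [if_pos (by omega)]
      rw [pvBGo_step msg hmne 4 (by norm_num), hd64 64 (by omega), pvBGo_nil]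
      simp [h0]
    · by_cases hd : n ≤ 128
      · -- two lines
        simp only [List.foldl, pvAStep]
        rw [if_neg (by omega), if_pos (by norm_num)]
        simp only [List.foldl]
        rw [if_neg (by omega), if_pos (by norm_num)]
        simp only [List.foldl]
        rw [if_pos (by omega)]
        rw [pvBGo_step msg hmne 4 (by norm_num),
            pvBGo_step _ (hne 64 (by omega)) (4-1) (by norm_num),
            List.drop_drop, hd64 (64+64) (by omega), pvBGo_nil]
        simp [h0, h1]
      · by_cases he : n ≤ 192
        · -- three lines
          simp only [List.foldl, pvAStep]
          rw [if_neg (by omega), if_pos (by norm_num)]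
          simp only [List.foldl]
          rw [if_neg (by omega), if_pos (by norm_num)]
          simp only [List.foldl]
          rw [if_neg (by omega), if_pos (by norm_num)]
          simp only [List.foldl]
          rw [if_pos (by omega)]
          rw [pvBGo_step msg hmne 4 (by norm_num),
              pvBGo_step _ (hne 64 (by omega)) (4-1) (by norm_num),
              List.drop_drop,
              pvBGo_step _ (hne (64+64) (by omega)) (4-1-1) (by norm_num),
              List.drop_drop, hd64 (64+64+64) (by omega), pvBGo_nil]
          simp [h0, h1, h2]
        · -- four lines
          have hr192 : (msg.drop 192).length = n - 192 := by simp [← hn]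
          simp only [List.foldl, pvAStep]
          rw [if_neg (by omega), if_pos (by norm_num)]
          simp only [List.foldl]
          rw [if_neg (by omega), if_pos (by norm_num)]
          simp only [List.foldl]
          rw [if_neg (by omega), if_pos (by norm_num)]
          simp only [List.foldl]
          rw [if_neg (by omega), if_neg (by norm_num)]
          rw [pvBGo_step msg hmne 4 (by norm_num),
              pvBGo_step _ (hne 64 (by omega)) (4-1) (by norm_num),
              List.drop_drop,
              pvBGo_step _ (hne (64+64) (by omega)) (4-1-1) (by norm_num),
              List.drop_drop,
              show (4:Int)-1-1-1 = 1 from by norm_num,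
              pvBGo_last _ (hne (64+64+64) (by omega))]
          by_cases hf : n ≤ 256
          · rw [if_neg (by omega)]
            rw [if_neg (by rw [show ((64:Nat)+64+64) = 192 from rfl, hr192]; omega)]
            have hfrom : PySem.List.slice msg (some 192) none = msg.drop 192 := by
              rw [PySem.List.slice_from _ (by norm_num)]; rfl
            simp [h0, h1, h2, hfrom]
          · rw [if_pos (by omega)]
            rw [if_pos (by rw [show ((64:Nat)+64+64) = 192 from rfl, hr192]; omega)]
            have h254 : PySem.List.slice msg (some 192) (some 254) = (msg.drop 192).take 62 := by
              rw [PySem.List.slice_toNat _ (by norm_num) (by norm_num)]; rfl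
            simp [h0, h1, h2, h254]

-- ===== VERDICT (by name: the statement is the Claim_ definition above) =====
theorem format_reply_message_spec : Claim_equal_format_reply_message := by
  intro message _
  unfold Spec_format_reply_message format_reply_message format_reply_message_alt
  simp only
  rw [lines_eq]
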